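-- pv_equiv track=rewrite | github.com/Suffix30/LANTERNv2.0 | core/bypass.py | create_template_variants
-- ===== SOURCE A (Python) =====
-- from typing import List, Dict, Callable, Pattern, Set
--
-- def create_template_variants(template: str, placeholders: Dict[str, List[str]]) -> List[str]:
--     variants = [template]
--     for placeholder, values in placeholders.items():
--         new_variants = []
--         for variant in variants:
--             for value in values:
--                 new_variants.append(variant.replace(f"{{{placeholder}}}", value))
--         variants = new_variants
--     return variants
-- ===== SOURCE B (Python) =====
-- from itertools import product
-- from typing import List, Dict
--
-- def create_template_variants(template: str, placeholders: Dict[str, List[str]]) -> List[str]: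
--     names = list(placeholders.keys())
--     out = []
--     for combo in product(*placeholders.values()):
--         variant = template
--         for name, value in zip(names, combo):
--             variant = variant.replace(f"{{{name}}}", value)
--         out.append(variant)
--     return out
-- ===== Notes on version B (the rewrite author's own statement) =====
-- stated objective: alternative
-- what changed: B enumerates the full Cartesian product of the value lists with itertools.product and applies each combination's replacements sequentially to the template, instead of A's growing a working variants list one placeholder at a time.
import Mathlib
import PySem

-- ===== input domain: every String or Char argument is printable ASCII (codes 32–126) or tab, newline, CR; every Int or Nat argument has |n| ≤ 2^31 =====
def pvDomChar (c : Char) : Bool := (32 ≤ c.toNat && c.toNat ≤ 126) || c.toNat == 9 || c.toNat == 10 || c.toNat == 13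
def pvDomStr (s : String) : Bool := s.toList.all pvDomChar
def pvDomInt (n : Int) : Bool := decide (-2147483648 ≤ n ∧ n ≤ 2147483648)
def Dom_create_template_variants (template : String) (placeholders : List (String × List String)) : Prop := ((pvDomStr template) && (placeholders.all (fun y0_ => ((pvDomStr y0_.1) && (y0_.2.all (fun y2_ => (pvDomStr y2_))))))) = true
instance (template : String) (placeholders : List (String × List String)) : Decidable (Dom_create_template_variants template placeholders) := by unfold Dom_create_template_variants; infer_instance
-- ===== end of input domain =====

-- B enumerates the Cartesian product of the value lists directly (itertools.product) instead of
-- A's incremental list expansion; same results and order, a different decomposition (no speed claim).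
-- ===== PORT A =====
-- A: incremental expansion — grow the variants list one placeholder at a time (nested loops as foldl).
def create_template_variants (template : String) (placeholders : List (String × List String)) : List String :=
  placeholders.foldl
    (fun variants pv =>
      variants.foldl
        (fun new_variants variant =>
          pv.2.foldl
            (fun nv value => nv ++ [PySem.Str.replace variant ("{" ++ pv.1 ++ "}") value])
            new_variants)
        [])
    [template]

-- ===== PORT B =====
-- B: enumerate the full Cartesian product of the value lists (itertools.product),
-- then apply each combination's replacements sequentially to the template.
def pvProduct : List (List String) → List (List String)
  | [] => [[]]
  | l :: ls => l.flatMap (fun x => (pvProduct ls).map (fun c => x :: c))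

def create_template_variants_alt (template : String) (placeholders : List (String × List String)) : List String :=
  (pvProduct (placeholders.map (·.2))).map
    (fun combo =>
      (List.zip (placeholders.map (·.1)) combo).foldl
        (fun variant p => PySem.Str.replace variant ("{" ++ p.1 ++ "}") p.2)
        template)

-- ===== PRECONDITION & SPEC =====
def Spec_create_template_variants (template : String) (placeholders : List (String × List String)) (out : List String) : Prop := out = create_template_variants_alt template placeholders
instance (template : String) (placeholders : List (String × List String)) (out : List String) : Decidable (Spec_create_template_variants template placeholders out) := by unfold Spec_create_template_variants; infer_instance

-- ===== CLAIM (what is proved, stated in full; the proofs are below) =====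
def Claim_equal_create_template_variants : Prop := ∀ (template : String) (placeholders : List (String × List String)), Dom_create_template_variants template placeholders → Spec_create_template_variants template placeholders (create_template_variants template placeholders)

-- ===== LEMMAS AND PROOFS =====

-- ===== VERDICT (by name: the statement is the Claim_ definition above) =====
-- one expansion step of A, written as flatMap
lemma stepA_eq_flatMap (vs : List String) (pv : String × List String) :
    vs.foldl
      (fun new_variants variant =>
        pv.2.foldl
          (fun nv value => nv ++ [PySem.Str.replace variant ("{" ++ pv.1 ++ "}") value])
          new_variants)
      [] =
    vs.flatMap (fun variant => pv.2.map (fun value => PySem.Str.replace variant ("{" ++ pv.1 ++ "}") value)) := by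
  simp only [PySem.List.foldl_append_singleton_eq_map]
  rw [PySem.List.foldl_append_eq_flatMap]
  simp

-- main invariant: A's remaining loop over ps, from any variants list vs, equals B's product form
lemma main_inv (ps : List (String × List String)) (vs : List String) :
    ps.foldl
      (fun variants pv =>
        variants.foldl
          (fun new_variants variant =>
            pv.2.foldl
              (fun nv value => nv ++ [PySem.Str.replace variant ("{" ++ pv.1 ++ "}") value])
              new_variants)
          [])
      vs =
    vs.flatMap (fun v =>
      (pvProduct (ps.map (·.2))).map
        (fun combo =>
          (List.zip (ps.map (·.1)) combo).foldl
            (fun variant p => PySem.Str.replace variant ("{" ++ p.1 ++ "}") p.2)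
            v)) := by
  induction ps generalizing vs with
  | nil => simp [pvProduct]
  | cons p ps ih =>
    simp only [List.foldl_cons]
    rw [stepA_eq_flatMap, ih]
    simp [pvProduct, List.flatMap_assoc, List.flatMap_map, List.map_flatMap, List.map_map,
      List.zip_cons_cons, List.foldl_cons, Function.comp_def]

theorem create_template_variants_spec : Claim_equal_create_template_variants := by
  intro template placeholders _
  unfold Spec_create_template_variants create_template_variants create_template_variants_alt
  rw [main_inv]
  simp
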